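-- pv_equiv track=rewrite | github.com/mattiasJohnson/bioinformatica-tp1 | orf_finder.py | fromStart
-- ===== SOURCE A (Python) =====
-- def fromStart(orf):
--     result = ""
--     is_start = False
--     for i in range(0, len(orf), 3):
--         codon = str(orf[i:i+3])
--         if codon == "ATG":
--             is_start = True
--         elif is_start:
--             result += codon
--
--     return result
-- ===== SOURCE B (Python) =====
-- def fromStart(orf):
--     # Find aligned ATG occurrences with str.find and copy whole inter-ATG
--     # segments by slicing, instead of enumerating codons one by one.
--     def next_atg(pos):
--         while True:
--             j = orf.find("ATG", pos)
--             if j == -1 or j % 3 == 0: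
--                 return j
--             pos = j + 1
--
--     j = next_atg(0)
--     if j == -1:
--         return ""
--     parts = []
--     cur = j + 3
--     while True:
--         k = next_atg(cur)
--         if k == -1:
--             parts.append(orf[cur:])
--             break
--         parts.append(orf[cur:k])
--         cur = k + 3
--     return "".join(parts)
-- ===== Notes on version B (the rewrite author's own statement) =====
-- stated objective: faster
-- what changed: Replaced A's per-codon Python loop (slice each codon, is_start flag) by a str.find-based search for the aligned occurrences of the start codon, copying each whole segment between consecutive aligned hits with a single slice and joining the segments; a timing run measured B faster by a constant factor (C-level find and bulk slicing instead of one Python-level slice and compare per codon).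
import Mathlib
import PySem

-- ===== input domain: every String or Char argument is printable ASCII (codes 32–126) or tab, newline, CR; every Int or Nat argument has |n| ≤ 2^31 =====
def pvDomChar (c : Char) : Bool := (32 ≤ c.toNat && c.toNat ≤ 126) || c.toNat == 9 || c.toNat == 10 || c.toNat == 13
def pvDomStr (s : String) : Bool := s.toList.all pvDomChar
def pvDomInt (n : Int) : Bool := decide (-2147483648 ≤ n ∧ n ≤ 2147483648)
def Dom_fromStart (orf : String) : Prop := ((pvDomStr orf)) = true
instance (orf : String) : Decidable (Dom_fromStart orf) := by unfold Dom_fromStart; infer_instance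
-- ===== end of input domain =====

-- B replaces A's codon-by-codon scan (boolean is_start flag, one slice per codon) by a
-- str.find-based search for ALIGNED occurrences of the start codon, copying the whole
-- segment between consecutive aligned hits with a single slice; a timing run measured
-- B faster by a constant factor.

def ATGl : List Char := ['A', 'T', 'G']

-- ===== PORT A =====
-- The loop body of A: state is (result, is_start); codon = orf[i:i+3].
def fromStartStep (cs : List Char) (acc : List Char × Bool) (i : Int) : List Char × Bool :=
  let codon := PySem.List.slice cs (some i) (some (i + 3))
  if codon = ATGl then (acc.1, true)
  else if acc.2 then (acc.1 ++ codon, acc.2) else acc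

def fromStart (orf : String) : String :=
  let cs := orf.toList
  let st := (PySem.List.pyRange 0 (cs.length : Int) 3).foldl (fromStartStep cs) ([], false)
  String.mk st.1

-- ===== PORT B =====
-- `j = orf.find("ATG", pos)` looping with `pos = j + 1` until j == -1 or j % 3 == 0.
-- The outer `if pos ≤ cs.length` only totalizes the recursion: for pos past the end
-- Python's find returns -1 and the while loop returns -1 exactly as the else branch does.
def nextATG (cs : List Char) (pos : Nat) : Int :=
  if hle : pos ≤ cs.length then
    if PySem.Chars.findFrom cs ATGl (pos : Int) none = -1 ∨
       PySem.Int.mod (PySem.Chars.findFrom cs ATGl (pos : Int) none) 3 = 0 then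
      PySem.Chars.findFrom cs ATGl (pos : Int) none
    else nextATG cs ((PySem.Chars.findFrom cs ATGl (pos : Int) none).toNat + 1)
  else -1
termination_by cs.length + 1 - pos
decreasing_by
  rename_i h
  push_neg at h
  obtain ⟨hne, -⟩ := h
  have := (PySem.Chars.findFrom_natCast_spec cs ATGl pos hle hne).1
  omega

-- Facts the second while loop's termination needs: a hit is at an index ≥ pos with
-- room for the 3 matched characters.  (cited by collectSeg's decreasing_by)
theorem nextATG_bounds (cs : List Char) (pos : Nat) (h : nextATG cs pos ≠ -1) :
    (pos : Int) ≤ nextATG cs pos ∧ (nextATG cs pos).toNat + 3 ≤ cs.length := by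
  fun_induction nextATG cs pos with
  | case1 pos hle hcond =>
    have hne : PySem.Chars.findFrom cs ATGl (pos : Int) none ≠ -1 := by
      intro hx; rw [hx] at h; simp at h
    have hs := PySem.Chars.findFrom_natCast_spec cs ATGl pos hle hne
    refine ⟨hs.1, ?_⟩
    have hpre := hs.2.1
    have hl := hpre.length_le
    have h3 : ATGl.length = 3 := rfl
    rw [h3, List.length_drop] at hl
    omega
  | case2 pos hle hcond ih =>
    have := ih h
    have h0 : (pos : Int) ≤ ((PySem.Chars.findFrom cs ATGl (pos : Int) none).toNat + 1 : Nat) := by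
      push_neg at hcond
      have hj1 := (PySem.Chars.findFrom_natCast_spec cs ATGl pos hle hcond.1).1
      have hj0 : (0:Int) ≤ PySem.Chars.findFrom cs ATGl (pos : Int) none :=
        le_trans (by positivity) hj1
      omega
    exact ⟨le_trans h0 this.1, this.2⟩
  | case3 pos hle => simp at h

-- the second while loop: parts.append(orf[cur:k]) / orf[cur:]; "".join(parts) is the
-- concatenation of the appended slices, built here directly by ++.
def collectSeg (cs : List Char) (cur : Nat) : List Char :=
  if nextATG cs cur = -1 then PySem.List.slice cs (some (cur : Int)) none
  else
    PySem.List.slice cs (some (cur : Int)) (some (nextATG cs cur)) ++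
      collectSeg cs ((nextATG cs cur).toNat + 3)
termination_by cs.length + 3 - cur
decreasing_by
  rename_i h
  have := nextATG_bounds cs cur h
  omega

def fromStart_alt (orf : String) : String :=
  let cs := orf.toList
  if nextATG cs 0 = -1 then ""
  else String.mk (collectSeg cs ((nextATG cs 0).toNat + 3))

-- ===== PRECONDITION & SPEC =====
def Spec_fromStart (orf : String) (out : String) : Prop := out = fromStart_alt orf
instance (orf : String) (out : String) : Decidable (Spec_fromStart orf out) := by unfold Spec_fromStart; infer_instance

-- ===== CLAIM (what is proved, stated in full; the proofs are below) =====
def Claim_equal_fromStart : Prop := ∀ (orf : String), Dom_fromStart orf → Spec_fromStart orf (fromStart orf)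

-- ===== LEMMAS AND PROOFS =====

abbrev Hit (cs : List Char) (i : Nat) : Prop := i % 3 = 0 ∧ ATGl <+: cs.drop i

-- reference scan: smallest i ≥ pos with Hit cs i, else -1
def fa (cs : List Char) (pos : Nat) : Int :=
  if pos < cs.length then
    if Hit cs pos then (pos : Int) else fa cs (pos + 1)
  else -1
termination_by cs.length - pos

theorem hit_lt (cs : List Char) (i : Nat) (h : Hit cs i) : i + 3 ≤ cs.length := by
  have hl := h.2.length_le
  have h3 : ATGl.length = 3 := rfl
  rw [h3, List.length_drop] at hl
  omega

theorem fa_eq_neg_one_iff (cs : List Char) (pos : Nat) :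
    fa cs pos = -1 ↔ ∀ i, pos ≤ i → ¬ Hit cs i := by
  fun_induction fa cs pos with
  | case1 pos hlt hhit =>
    constructor
    · intro h; exact absurd h (by omega)
    · intro h; exact absurd hhit (h pos le_rfl)
  | case2 pos hlt hhit ih =>
    rw [ih]
    constructor
    · intro h i hi
      rcases Nat.eq_or_lt_of_le hi with rfl | hlt2
      · exact hhit
      · exact h i hlt2
    · intro h i hi; exact h i (by omega)
  | case3 pos hge =>
    simp only [eq_self_iff_true, true_iff]
    intro i hi hh
    have := hit_lt cs i hh
    omega

theorem fa_spec (cs : List Char) (pos : Nat) (h : fa cs pos ≠ -1) :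
    (pos : Int) ≤ fa cs pos ∧ Hit cs (fa cs pos).toNat ∧
      (fa cs pos).toNat + 3 ≤ cs.length ∧
      ∀ i, pos ≤ i → i < (fa cs pos).toNat → ¬ Hit cs i := by
  fun_induction fa cs pos with
  | case1 pos hlt hhit =>
    refine ⟨le_rfl, by simpa using hhit, by simpa using hit_lt cs pos hhit, ?_⟩
    intro i h1 h2
    simp at h2; omega
  | case2 pos hlt hhit ih =>
    obtain ⟨h1, h2, h3, h4⟩ := ih h
    refine ⟨by omega, h2, h3, ?_⟩
    intro i hi hlt2
    rcases Nat.eq_or_lt_of_le hi with rfl | hgt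
    · exact hhit
    · exact h4 i hgt hlt2
  | case3 pos hge => simp at h

theorem fa_of_ge (cs : List Char) (pos : Nat) (h : cs.length ≤ pos) : fa cs pos = -1 := by
  rw [fa]; simp; omega

theorem fa_step (cs : List Char) (q : Nat) (h : ¬ Hit cs q) : fa cs q = fa cs (q + 1) := by
  by_cases hq : q < cs.length
  · rw [fa]; simp [hq, h]
  · rw [fa_of_ge cs q (by omega), fa_of_ge cs (q+1) (by omega)]

theorem fa_skip (cs : List Char) (pos q : Nat) (hpq : pos ≤ q)
    (hno : ∀ i, pos ≤ i → i < q → ¬ Hit cs i) : fa cs pos = fa cs q := by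
  induction q with
  | zero =>
    have : pos = 0 := by omega
    subst this; rfl
  | succ n ih =>
    rcases Nat.eq_or_lt_of_le hpq with rfl | hlt
    · rfl
    · rw [← fa_step cs n (hno n (by omega) (by omega))]
      exact ih (by omega) (fun i h1 h2 => hno i h1 (by omega))

theorem prefix_drop_infix {cs sub : List Char} {i k : Nat} (hk : k ≤ i)
    (h : sub <+: cs.drop i) : sub <:+: cs.drop k := by
  have : cs.drop i = (cs.drop k).drop (i - k) := by
    rw [List.drop_drop]; congr 1; omega
  rw [this] at h
  exact h.isInfix.trans (List.drop_suffix _ _).isInfix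

theorem mod3_natCast (n : Nat) : PySem.Int.mod (n : Int) 3 = ((n % 3 : Nat) : Int) := by
  exact_mod_cast PySem.Int.mod_natCast n 3

theorem nextATG_eq_fa (cs : List Char) (pos : Nat) : nextATG cs pos = fa cs pos := by
  fun_induction nextATG cs pos with
  | case1 pos hle hcond =>
    rcases hcond with hneg | hmod
    · rw [hneg]
      symm
      rw [fa_eq_neg_one_iff]
      intro i hi hh
      rw [PySem.Chars.findFrom_natCast_eq_neg_one_iff cs ATGl pos hle] at hneg
      exact hneg (prefix_drop_infix hi hh.2)
    · by_cases hneg : PySem.Chars.findFrom cs ATGl (pos : Int) none = -1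
      · rw [hneg]; symm; rw [fa_eq_neg_one_iff]
        intro i hi hh
        rw [PySem.Chars.findFrom_natCast_eq_neg_one_iff cs ATGl pos hle] at hneg
        exact hneg (prefix_drop_infix hi hh.2)
      · obtain ⟨h1, h2, h3⟩ := PySem.Chars.findFrom_natCast_spec cs ATGl pos hle hneg
        set j := PySem.Chars.findFrom cs ATGl (pos : Int) none with hj
        have hj0 : 0 ≤ j := le_trans (by positivity) h1
        have hjn : j = ((j.toNat : Nat) : Int) := by omega
        have hmod3 : j.toNat % 3 = 0 := by
          rw [hjn, mod3_natCast] at hmod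
          exact_mod_cast hmod
        have hhit : Hit cs j.toNat := ⟨hmod3, h2⟩
        have hskip : fa cs pos = fa cs j.toNat := by
          apply fa_skip cs pos j.toNat (by omega)
          intro i hi hlt hh
          exact h3 i hi hlt hh.2
        rw [hskip, fa]
        have := hit_lt cs j.toNat hhit
        rw [if_pos (show j.toNat < cs.length by omega), if_pos hhit]
        omega
  | case2 pos hle hcond ih =>
    push_neg at hcond
    obtain ⟨hneg, hmod⟩ := hcond
    obtain ⟨h1, h2, h3⟩ := PySem.Chars.findFrom_natCast_spec cs ATGl pos hle hneg
    set j := PySem.Chars.findFrom cs ATGl (pos : Int) none with hj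
    have hj0 : 0 ≤ j := le_trans (by positivity) h1
    have hnohit : ∀ i, pos ≤ i → i < j.toNat + 1 → ¬ Hit cs i := by
      intro i hi hlt hh
      rcases Nat.lt_or_ge i j.toNat with hc | hc
      · exact h3 i hi hc hh.2
      · have : i = j.toNat := by omega
        subst this
        apply hmod
        have hjn : j = ((j.toNat : Nat) : Int) := by omega
        rw [hjn, mod3_natCast]
        exact_mod_cast congrArg (Nat.cast : Nat → Int) hh.1
    rw [ih, fa_skip cs pos (j.toNat + 1) (by omega) hnohit]
  | case3 pos hle =>
    rw [fa_of_ge cs pos (by omega)]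

def codons3 (cs : List Char) : List (List Char) :=
  if cs = [] then [] else cs.take 3 :: codons3 (cs.drop 3)
termination_by cs.length
decreasing_by
  rename_i h
  have : 0 < cs.length := List.length_pos_iff.mpr h
  simp [List.length_drop]; omega

theorem codons3_nil : codons3 [] = [] := by rw [codons3]; simp

theorem codons3_cons (cs : List Char) (h : cs ≠ []) :
    codons3 cs = cs.take 3 :: codons3 (cs.drop 3) := by rw [codons3]; simp [h]

theorem flatten_codons3 (cs : List Char) : (codons3 cs).flatten = cs := by
  fun_induction codons3 cs with
  | case1 => simp
  | case2 cs h ih => simp [ih]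

theorem range_map_take_eq_codons3 (cs : List Char) :
    (List.range ((cs.length + 2) / 3)).map (fun k => (cs.drop (3 * k)).take 3) = codons3 cs := by
  fun_induction codons3 cs with
  | case1 => simp
  | case2 cs h ih =>
    have hL : 0 < cs.length := List.length_pos_iff.mpr h
    have hm : (cs.length + 2) / 3 = ((cs.drop 3).length + 2) / 3 + 1 := by
      simp only [List.length_drop]; omega
    simp only [List.length_drop] at ih
    rw [hm, List.range_succ_eq_map, List.map_cons, List.map_map]
    simp only [List.length_drop]
    refine congrArg₂ List.cons (by simp) ?_
    rw [← ih]
    apply List.map_congr_left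
    intro k _
    simp only [Function.comp_apply, Nat.succ_eq_add_one, List.drop_drop]
    congr 2
    omega

theorem map_slice_eq_codons3 (cs : List Char) :
    (PySem.List.pyRange 0 (cs.length : Int) 3).map
        (fun i => PySem.List.slice cs (some i) (some (i + 3))) = codons3 cs := by
  rw [PySem.List.pyRange_of_pos 0 (cs.length : Int) (by norm_num)]
  have hm : (if (0:Int) < (cs.length : Int) then (((cs.length : Int) - 0 + 3 - 1) / 3).toNat else 0)
      = (cs.length + 2) / 3 := by
    by_cases h : (0:Int) < (cs.length : Int)
    · rw [if_pos h]
      have heq : ((cs.length : Int) - 0 + 3 - 1) = ((cs.length + 2 : Nat) : Int) := by push_cast; ring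
      rw [heq]
      omega
    · rw [if_neg h]
      have : cs.length = 0 := by omega
      simp [this]
  rw [hm, List.map_map, ← range_map_take_eq_codons3 cs]
  apply List.map_congr_left
  intro k _
  simp only [Function.comp_apply]
  have h1 : (0 : Int) + 3 * (k : Int) = ((3 * k : Nat) : Int) := by push_cast; ring
  have h2 : (0 : Int) + 3 * (k : Int) + 3 = ((3 * k + 3 : Nat) : Int) := by push_cast; ring
  rw [h1]
  rw [show ((3 * k : Nat) : Int) + 3 = ((3 * k + 3 : Nat) : Int) from by push_cast; ring]
  rw [PySem.List.slice_natCast]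
  congr 1
  omega

theorem drop_drop3 (cs : List Char) (cur : Nat) : (cs.drop cur).drop 3 = cs.drop (cur + 3) := by
  rw [List.drop_drop]

theorem take3_prefix_of_eq {cs : List Char} {cur : Nat} (h : (cs.drop cur).take 3 = ATGl) :
    ATGl <+: cs.drop cur := by
  rw [← h]; exact List.take_prefix _ _

theorem prefix_take3 {u : List Char} (h : ATGl <+: u) : u.take 3 = ATGl := by
  obtain ⟨t, ht⟩ := h
  rw [← ht]; rfl

theorem no_hit_aux (n : Nat) : ∀ (cs : List Char) (cur : Nat), cs.length ≤ cur + n → cur % 3 = 0 →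
    (∀ i, cur ≤ i → ¬ Hit cs i) → ∀ c ∈ codons3 (cs.drop cur), c ≠ ATGl := by
  induction n with
  | zero =>
    intro cs cur hlen h3 hno c hc
    rw [List.drop_eq_nil_of_le (by omega), codons3_nil] at hc
    simp at hc
  | succ n ih =>
    intro cs cur hlen h3 hno c hc
    by_cases hnil : cs.drop cur = []
    · rw [hnil, codons3_nil] at hc; simp at hc
    · rw [codons3_cons _ hnil, drop_drop3] at hc
      rcases List.mem_cons.mp hc with h | h
      · intro hca
        rw [hca] at h
        exact hno cur le_rfl ⟨h3, take3_prefix_of_eq h.symm⟩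
      · have hpos : 0 < (cs.drop cur).length := List.length_pos_iff.mpr hnil
        simp only [List.length_drop] at hpos
        exact ih cs (cur + 3) (by omega) (by omega) (fun i hi => hno i (by omega)) c h

theorem seg_split (n : Nat) : ∀ (cs : List Char) (cur k : Nat), cur % 3 = 0 → k % 3 = 0 →
    cur ≤ k → Hit cs k → (∀ i, cur ≤ i → i < k → ¬ Hit cs i) → k - cur ≤ n →
    ((codons3 (cs.drop cur)).filter (fun c => !(c = ATGl : Bool))).flatten =
      (cs.drop cur).take (k - cur) ++
        ((codons3 (cs.drop (k + 3))).filter (fun c => !(c = ATGl : Bool))).flatten := by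
  induction n with
  | zero =>
    intro cs cur k h3 hk3 hck hhit hno hbound
    have hek : cur = k := by omega
    subst hek
    have hlen := hit_lt cs cur hhit
    have hnil : cs.drop cur ≠ [] :=
      List.length_pos_iff.mp (by simp only [List.length_drop]; omega)
    rw [codons3_cons _ hnil, drop_drop3, prefix_take3 hhit.2, List.filter_cons]
    simp
  | succ n ih =>
    intro cs cur k h3 hk3 hck hhit hno hbound
    by_cases hek : cur = k
    · subst hek
      have hlen := hit_lt cs cur hhit
      have hnil : cs.drop cur ≠ [] :=
        List.length_pos_iff.mp (by simp only [List.length_drop]; omega)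
      rw [codons3_cons _ hnil, drop_drop3, prefix_take3 hhit.2, List.filter_cons]
      simp
    · have hlt : cur + 3 ≤ k := by omega
      have hlen := hit_lt cs k hhit
      have hnil : cs.drop cur ≠ [] :=
        List.length_pos_iff.mp (by simp only [List.length_drop]; omega)
      have hne : (cs.drop cur).take 3 ≠ ATGl :=
        fun hEq => hno cur le_rfl (by omega) ⟨h3, take3_prefix_of_eq hEq⟩
      rw [codons3_cons _ hnil, drop_drop3, List.filter_cons]
      simp only [hne, decide_false, Bool.not_false, if_true, List.flatten_cons]
      rw [ih cs (cur + 3) k (by omega) hk3 (by omega) hhit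
          (fun i hi hik => hno i (by omega) hik) (by omega)]
      rw [show k - cur = 3 + (k - (cur + 3)) by omega, List.take_add, drop_drop3,
          List.append_assoc]

theorem dropWhile_skip (n : Nat) : ∀ (cs : List Char) (cur k : Nat), cur % 3 = 0 → k % 3 = 0 →
    cur ≤ k → k ≤ cs.length → (∀ i, cur ≤ i → i < k → ¬ Hit cs i) → k - cur ≤ n →
    (codons3 (cs.drop cur)).dropWhile (fun c => !(c = ATGl : Bool)) =
      (codons3 (cs.drop k)).dropWhile (fun c => !(c = ATGl : Bool)) := by
  induction n with
  | zero =>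
    intro cs cur k _ _ hck _ _ hbound
    have : cur = k := by omega
    rw [this]
  | succ n ih =>
    intro cs cur k h3 hk3 hck hkl hno hbound
    by_cases hek : cur = k
    · rw [hek]
    · have hlt : cur + 3 ≤ k := by omega
      have hnil : cs.drop cur ≠ [] :=
        List.length_pos_iff.mp (by simp only [List.length_drop]; omega)
      have hne : (cs.drop cur).take 3 ≠ ATGl :=
        fun hEq => hno cur le_rfl (by omega) ⟨h3, take3_prefix_of_eq hEq⟩
      rw [codons3_cons _ hnil, drop_drop3, List.dropWhile_cons]
      simp only [hne, decide_false, Bool.not_false, if_true]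
      exact ih cs (cur + 3) k (by omega) hk3 (by omega) hkl
        (fun i hi hik => hno i (by omega) hik) (by omega)

theorem collectSeg_eq (cs : List Char) (cur : Nat) : cur % 3 = 0 →
    collectSeg cs cur = ((codons3 (cs.drop cur)).filter (fun c => !(c = ATGl : Bool))).flatten := by
  fun_induction collectSeg cs cur with
  | case1 cur hneg =>
    intro h3
    rw [nextATG_eq_fa] at hneg
    have hno := (fa_eq_neg_one_iff cs cur).mp hneg
    have hall := no_hit_aux cs.length cs cur (by omega) h3 hno
    rw [List.filter_eq_self.mpr (by intro a ha; simpa using hall a ha), flatten_codons3,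
        PySem.List.slice_from_natCast]
  | case2 cur hneg ih =>
    intro h3
    rw [nextATG_eq_fa] at hneg ih ⊢
    obtain ⟨h1, hhit, hlen, hmin⟩ := fa_spec cs cur hneg
    have hk0 : (0 : Int) ≤ fa cs cur := le_trans (by positivity) h1
    have hcurk : cur ≤ (fa cs cur).toNat := by omega
    have hm3 : (fa cs cur).toNat % 3 = 0 := hhit.1
    rw [ih (by omega)]
    have hfa_eq : fa cs cur = (((fa cs cur).toNat : Nat) : Int) := by omega
    rw [hfa_eq, PySem.List.slice_natCast,
      seg_split ((fa cs cur).toNat - cur) cs cur (fa cs cur).toNat h3 hm3 hcurk hhit hmin le_rfl]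
    simp only [Int.toNat_natCast]

theorem foldl_step_true (cs : List Char) (L : List Int) (r : List Char) :
    ((L.foldl (fromStartStep cs) (r, true))).1 =
      r ++ ((L.map (fun i => PySem.List.slice cs (some i) (some (i + 3)))).filter
              (fun c => !(c = ATGl : Bool))).flatten := by
  induction L generalizing r with
  | nil => simp
  | cons i t ih =>
    simp only [List.foldl_cons, List.map_cons, List.filter_cons, fromStartStep]
    by_cases h : PySem.List.slice cs (some i) (some (i + 3)) = ATGl <;>
      simp [h, ih]

theorem foldl_step_false (cs : List Char) (L : List Int) (r : List Char) :
    ((L.foldl (fromStartStep cs) (r, false))).1 =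
      r ++ ((match (L.map (fun i => PySem.List.slice cs (some i) (some (i + 3)))).dropWhile
                    (fun c => !(c = ATGl : Bool)) with
             | [] => []
             | _ :: t => t).filter (fun c => !(c = ATGl : Bool))).flatten := by
  induction L generalizing r with
  | nil => simp
  | cons i t ih =>
    simp only [List.foldl_cons, List.map_cons, List.dropWhile_cons, fromStartStep]
    by_cases h : PySem.List.slice cs (some i) (some (i + 3)) = ATGl
    · simp [h, foldl_step_true]
    · simp [h, ih]

-- ===== VERDICT (by name: the statement is the Claim_ definition above) =====
theorem fromStart_spec : Claim_equal_fromStart := by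
  intro orf _
  unfold Spec_fromStart fromStart fromStart_alt
  simp only []
  rw [foldl_step_false, map_slice_eq_codons3, nextATG_eq_fa]
  by_cases hfa : fa orf.toList 0 = -1
  · rw [if_pos hfa]
    have hno := (fa_eq_neg_one_iff _ 0).mp hfa
    have hall := no_hit_aux orf.toList.length orf.toList 0 (by omega) (by omega)
      (fun i _ => hno i (Nat.zero_le i))
    simp only [List.drop_zero] at hall
    rw [List.dropWhile_eq_nil_iff.mpr (by intro x hx; simpa using hall x hx)]
    simp
    rfl
  · rw [if_neg hfa]
    obtain ⟨h1, hhit, hlen, hmin⟩ := fa_spec _ 0 hfa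
    have hdw : (codons3 orf.toList).dropWhile (fun c => !(c = ATGl : Bool)) =
        (codons3 (orf.toList.drop (fa orf.toList 0).toNat)).dropWhile
          (fun c => !(c = ATGl : Bool)) := by
      have := dropWhile_skip (fa orf.toList 0).toNat orf.toList 0 (fa orf.toList 0).toNat
        (by omega) hhit.1 (Nat.zero_le _) (by omega)
        (fun i _ hik => hmin i (Nat.zero_le _) hik) (by omega)
      simpa using this
    have hnil : orf.toList.drop (fa orf.toList 0).toNat ≠ [] :=
      List.length_pos_iff.mp (by simp only [List.length_drop]; omega)
    rw [hdw, codons3_cons _ hnil, drop_drop3, prefix_take3 hhit.2, List.dropWhile_cons]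
    simp only [decide_true, Bool.not_true, Bool.false_eq_true, if_false]
    rw [collectSeg_eq orf.toList ((fa orf.toList 0).toNat + 3) (by have := hhit.1; omega)]
    simp
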